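-- pv_equiv track=rewrite | github.com/dar1acraciun/Proiect-Ai-2025-2026 | problems/nash_quiz.py | explain_cell
-- ===== SOURCE A (Python) =====
-- def explain_cell(matrix, i, j, rows, cols) -> str:
--     u1, u2 = matrix[i][j]
--
--     # Best responses
--     best_p1 = max(matrix[r][j][0] for r in range(len(matrix)))
--     best_p2 = max(matrix[i][c][1] for c in range(len(matrix[0])))
--
--     lines = []
--     lines.append(f"Strategia ({rows[i]}, {cols[j]}) cu payoff ({u1}, {u2}):")
--
--     if u1 == best_p1:
--         lines.append(f" ✔ Player 1 NU poate îmbunătăți payoff-ul (max = {best_p1}).")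
--     else:
--         better = [rows[r] for r in range(len(matrix)) if matrix[r][j][0] == best_p1]
--         lines.append(f" ✘ Player 1 poate devia la {better} și obține {best_p1} > {u1}.")
--
--     if u2 == best_p2:
--         lines.append(f" ✔ Player 2 NU poate îmbunătăți payoff-ul (max = {best_p2}).")
--     else:
--         better = [cols[c] for c in range(len(matrix[0])) if matrix[i][c][1] == best_p2]
--         lines.append(f" ✘ Player 2 poate devia la {better} și obține {best_p2} > {u2}.")
--
--     if u1 == best_p1 and u2 == best_p2:
--         lines.append(" ⇒ Aceasta ESTE un echilibru Nash pur.")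
--     else:
--         lines.append(" ⇒ Aceasta NU este un echilibru Nash pur.")
--
--     return "\n".join(lines)
-- ===== SOURCE B (Python) =====
-- def explain_cell(matrix, i, j, rows, cols) -> str:
--     u1, u2 = matrix[i][j]
--
--     # One argmax-tracking pass: running best value + names achieving it.
--     def best_and_args(pairs):
--         best, names = None, []
--         for name, v in pairs:
--             if best is None or v > best:
--                 best, names = v, [name]
--             elif v == best:
--                 names.append(name)
--         return best, names
--
--     best_p1, dev1 = best_and_args((rows[r], matrix[r][j][0]) for r in range(len(matrix)))
--     best_p2, dev2 = best_and_args((cols[c], matrix[i][c][1]) for c in range(len(matrix[0])))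
--     ok1, ok2 = u1 == best_p1, u2 == best_p2
--
--     lines = [f"Strategia ({rows[i]}, {cols[j]}) cu payoff ({u1}, {u2}):"]
--     lines.append(f" ✔ Player 1 NU poate îmbunătăți payoff-ul (max = {best_p1})." if ok1
--                  else f" ✘ Player 1 poate devia la {dev1} și obține {best_p1} > {u1}.")
--     lines.append(f" ✔ Player 2 NU poate îmbunătăți payoff-ul (max = {best_p2})." if ok2
--                  else f" ✘ Player 2 poate devia la {dev2} și obține {best_p2} > {u2}.")
--     lines.append(" ⇒ Aceasta ESTE un echilibru Nash pur." if ok1 and ok2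
--                  else " ⇒ Aceasta NU este un echilibru Nash pur.")
--     return "\n".join(lines)
-- ===== Notes on version B (the rewrite author's own statement) =====
-- stated objective: alternative
-- what changed: Each axis's max()-scan plus separate filtering comprehension is replaced by one argmax-tracking pass that maintains the running best payoff together with the list of strategy names achieving it (reset on a strictly greater value, append on a tie), and the precomputed (best, deviation-list) pairs feed the same equality checks and formatting.
import Mathlib
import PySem

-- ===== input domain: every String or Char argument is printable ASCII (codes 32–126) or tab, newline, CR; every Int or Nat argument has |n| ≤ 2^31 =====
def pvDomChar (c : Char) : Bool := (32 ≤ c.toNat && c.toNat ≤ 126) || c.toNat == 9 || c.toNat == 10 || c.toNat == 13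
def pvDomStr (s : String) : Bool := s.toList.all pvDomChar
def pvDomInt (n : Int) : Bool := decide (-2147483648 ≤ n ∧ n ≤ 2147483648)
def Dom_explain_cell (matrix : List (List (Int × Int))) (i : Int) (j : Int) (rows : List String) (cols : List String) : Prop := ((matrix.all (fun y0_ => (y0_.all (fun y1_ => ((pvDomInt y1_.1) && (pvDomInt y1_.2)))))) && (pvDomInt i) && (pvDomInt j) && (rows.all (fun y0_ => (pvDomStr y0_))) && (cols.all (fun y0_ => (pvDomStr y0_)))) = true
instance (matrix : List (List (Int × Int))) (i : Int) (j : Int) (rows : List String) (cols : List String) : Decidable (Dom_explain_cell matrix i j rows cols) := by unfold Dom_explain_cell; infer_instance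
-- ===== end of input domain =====

-- B replaces each axis's max()-scan plus separate filtering comprehension by ONE argmax-tracking
-- pass that maintains the running best payoff together with the names achieving it (alternative
-- decomposition, same cost).

-- ===== PORT A =====
-- shared formatting helpers: Python's repr of a str / of a list of str (exact on the printable-ASCII
-- + tab/newline/CR domain: repr escapes only '\', the quote character, and \t \n \r there)
def pvReprChar (q : Char) (c : Char) : List Char :=
  if c = '\\' then ['\\', '\\']
  else if c = q then ['\\', q]
  else if c = '\t' then ['\\', 't']
  else if c = '\n' then ['\\', 'n']
  else if c = '\r' then ['\\', 'r']
  else [c]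

def pvReprStr (s : String) : String :=
  let q : Char := if s.toList.contains '\'' && !(s.toList.contains '"') then '"' else '\''
  String.ofList (q :: (s.toList.flatMap (pvReprChar q) ++ [q]))

def pvReprList (xs : List String) : String :=
  "[" ++ PySem.Str.join ", " (xs.map pvReprStr) ++ "]"

def explain_cell (matrix : List (List (Int × Int))) (i : Int) (j : Int) (rows : List String) (cols : List String) : String :=
  let u := PySem.List.pyGetD (PySem.List.pyGetD matrix i []) j (0, 0)
  let u1 := u.1
  let u2 := u.2
  -- max(generator): .getD 0 is never used — none = ValueError on an empty matrix/row, excluded by Pre_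
  let best_p1 := (PySem.List.max? ((PySem.List.pyRange 0 (matrix.length : Int) 1).map (fun r => (PySem.List.pyGetD (PySem.List.pyGetD matrix r []) j (0, 0)).1)) (fun x => x)).getD 0
  let best_p2 := (PySem.List.max? ((PySem.List.pyRange 0 ((PySem.List.pyGetD matrix 0 []).length : Int) 1).map (fun c => (PySem.List.pyGetD (PySem.List.pyGetD matrix i []) c (0, 0)).2)) (fun x => x)).getD 0
  let line0 := "Strategia (" ++ PySem.List.pyGetD rows i "" ++ ", " ++ PySem.List.pyGetD cols j "" ++ ") cu payoff (" ++ PySem.Int.toStr u1 ++ ", " ++ PySem.Int.toStr u2 ++ "):"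
  let line1 :=
    if u1 == best_p1 then " ✔ Player 1 NU poate îmbunătăți payoff-ul (max = " ++ PySem.Int.toStr best_p1 ++ ")."
    else
      let better := ((PySem.List.pyRange 0 (matrix.length : Int) 1).filter (fun r => (PySem.List.pyGetD (PySem.List.pyGetD matrix r []) j (0, 0)).1 == best_p1)).map (fun r => PySem.List.pyGetD rows r "")
      " ✘ Player 1 poate devia la " ++ pvReprList better ++ " și obține " ++ PySem.Int.toStr best_p1 ++ " > " ++ PySem.Int.toStr u1 ++ "."
  let line2 :=
    if u2 == best_p2 then " ✔ Player 2 NU poate îmbunătăți payoff-ul (max = " ++ PySem.Int.toStr best_p2 ++ ")."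
    else
      let better := ((PySem.List.pyRange 0 ((PySem.List.pyGetD matrix 0 []).length : Int) 1).filter (fun c => (PySem.List.pyGetD (PySem.List.pyGetD matrix i []) c (0, 0)).2 == best_p2)).map (fun c => PySem.List.pyGetD cols c "")
      " ✘ Player 2 poate devia la " ++ pvReprList better ++ " și obține " ++ PySem.Int.toStr best_p2 ++ " > " ++ PySem.Int.toStr u2 ++ "."
  let line3 :=
    if u1 == best_p1 && u2 == best_p2 then " ⇒ Aceasta ESTE un echilibru Nash pur."
    else " ⇒ Aceasta NU este un echilibru Nash pur."
  PySem.Str.join "\n" [line0, line1, line2, line3]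

-- ===== PORT B =====
-- Source B's best_and_args loop: running best value (None before the first element) + names achieving it
def pvArgmaxStep (st : Option Int × List String) (p : String × Int) : Option Int × List String :=
  match st with
  | (none, _) => (some p.2, [p.1])
  | (some b, names) =>
      if b < p.2 then (some p.2, [p.1])
      else if p.2 == b then (some b, names ++ [p.1])
      else (some b, names)

def pvBestAndArgs (ps : List (String × Int)) : Option Int × List String :=
  ps.foldl pvArgmaxStep (none, [])

def explain_cell_alt (matrix : List (List (Int × Int))) (i : Int) (j : Int) (rows : List String) (cols : List String) : String :=
  let u := PySem.List.pyGetD (PySem.List.pyGetD matrix i []) j (0, 0)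
  let r1 := pvBestAndArgs ((PySem.List.pyRange 0 (matrix.length : Int) 1).map (fun r => (PySem.List.pyGetD rows r "", (PySem.List.pyGetD (PySem.List.pyGetD matrix r []) j (0, 0)).1)))
  let r2 := pvBestAndArgs ((PySem.List.pyRange 0 ((PySem.List.pyGetD matrix 0 []).length : Int) 1).map (fun c => (PySem.List.pyGetD cols c "", (PySem.List.pyGetD (PySem.List.pyGetD matrix i []) c (0, 0)).2)))
  -- .getD 0 is never used: best is None only for an empty axis, excluded by Pre_
  let best_p1 := r1.1.getD 0
  let best_p2 := r2.1.getD 0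
  let ok1 := u.1 == best_p1
  let ok2 := u.2 == best_p2
  let line0 := "Strategia (" ++ PySem.List.pyGetD rows i "" ++ ", " ++ PySem.List.pyGetD cols j "" ++ ") cu payoff (" ++ PySem.Int.toStr u.1 ++ ", " ++ PySem.Int.toStr u.2 ++ "):"
  let line1 :=
    if ok1 then " ✔ Player 1 NU poate îmbunătăți payoff-ul (max = " ++ PySem.Int.toStr best_p1 ++ ")."
    else " ✘ Player 1 poate devia la " ++ pvReprList r1.2 ++ " și obține " ++ PySem.Int.toStr best_p1 ++ " > " ++ PySem.Int.toStr u.1 ++ "."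
  let line2 :=
    if ok2 then " ✔ Player 2 NU poate îmbunătăți payoff-ul (max = " ++ PySem.Int.toStr best_p2 ++ ")."
    else " ✘ Player 2 poate devia la " ++ pvReprList r2.2 ++ " și obține " ++ PySem.Int.toStr best_p2 ++ " > " ++ PySem.Int.toStr u.2 ++ "."
  let line3 :=
    if ok1 && ok2 then " ⇒ Aceasta ESTE un echilibru Nash pur."
    else " ⇒ Aceasta NU este un echilibru Nash pur."
  PySem.Str.join "\n" [line0, line1, line2, line3]

-- ===== PRECONDITION & SPEC =====
-- Pre_ excludes inputs on which A raises (index out of range, empty matrix/first row, a row of the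
-- scanned column shorter than |j| allows); it ALSO excludes label lists rows/cols shorter than the
-- matrix dimensions even where A still returns (deviation branch not taken): B's single pass reads
-- every label and raises IndexError there — see the cite in claim.json.
def Pre_explain_cell (matrix : List (List (Int × Int))) (i : Int) (j : Int) (rows : List String) (cols : List String) : Prop :=
  PySem.Raise.InRange matrix.length i ∧
  (∀ row ∈ matrix, PySem.Raise.InRange row.length j) ∧
  (PySem.List.pyGetD matrix 0 []).length ≤ (PySem.List.pyGetD matrix i []).length ∧
  matrix.length ≤ rows.length ∧
  (PySem.List.pyGetD matrix 0 []).length ≤ cols.length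
instance (matrix : List (List (Int × Int))) (i : Int) (j : Int) (rows : List String) (cols : List String) : Decidable (Pre_explain_cell matrix i j rows cols) := by unfold Pre_explain_cell; infer_instance

def pvWitness_explain_cell : (List (List (Int × Int))) × Int × Int × List String × List String :=
  ([[(1, 2), (0, 0)], [(0, 1), (3, 3)]], 0, 1, ["a", "b"], ["x", "y"])

def Spec_explain_cell (matrix : List (List (Int × Int))) (i : Int) (j : Int) (rows : List String) (cols : List String) (out : String) : Prop := out = explain_cell_alt matrix i j rows cols
instance (matrix : List (List (Int × Int))) (i : Int) (j : Int) (rows : List String) (cols : List String) (out : String) : Decidable (Spec_explain_cell matrix i j rows cols out) := by unfold Spec_explain_cell; infer_instance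

-- ===== CLAIM (what is proved, stated in full; the proofs are below) =====
def Claim_equal_explain_cell : Prop := ∀ (matrix : List (List (Int × Int))) (i : Int) (j : Int) (rows : List String) (cols : List String), Dom_explain_cell matrix i j rows cols → Pre_explain_cell matrix i j rows cols → Spec_explain_cell matrix i j rows cols (explain_cell matrix i j rows cols)

-- ===== LEMMAS AND PROOFS =====

-- the argmax loop, after its first step: best = running max, names = (kept seed) ++ ties with the max
lemma foldl_pvArgmaxStep (t : List (String × Int)) : ∀ (b : Int) (ns : List String),
    t.foldl pvArgmaxStep (some b, ns) =
      (some (t.foldl (fun a p => max a p.2) b),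
       (if t.foldl (fun a p => max a p.2) b = b then ns else []) ++
         (t.filter (fun p => p.2 == t.foldl (fun a p => max a p.2) b)).map Prod.fst) := by
  induction t with
  | nil => intro b ns; simp
  | cons p t ih =>
    intro b ns
    have hle : ∀ (c : Int), c ≤ t.foldl (fun a p => max a p.2) c := by
      intro c
      have := PySem.List.le_foldl_max (t.map Prod.snd) c
      simpa [List.foldl_map] using this.1
    rcases lt_trichotomy b p.2 with h | h | h
    · have hb : pvArgmaxStep (some b, ns) p = (some p.2, [p.1]) := by
        simp [pvArgmaxStep, h]
      have hmax : max b p.2 = p.2 := by omega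
      have hM : p.2 ≤ t.foldl (fun a p => max a p.2) p.2 := hle p.2
      have hne : t.foldl (fun a p => max a p.2) p.2 ≠ b := by omega
      simp only [List.foldl_cons, hb, ih, hmax, List.filter_cons, if_neg hne]
      by_cases hMv : t.foldl (fun a p => max a p.2) p.2 = p.2
      · rw [if_pos hMv, if_pos (by simp [hMv])]
        simp
      · rw [if_neg hMv, if_neg (by simp; omega)]
    · have hb : pvArgmaxStep (some b, ns) p = (some b, ns ++ [p.1]) := by
        simp [pvArgmaxStep, h]
      have hmax : max b p.2 = b := by omega
      simp only [List.foldl_cons, hb, ih, hmax, List.filter_cons]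
      by_cases hMb : t.foldl (fun a p => max a p.2) b = b
      · rw [if_pos hMb, if_pos hMb, if_pos (by simp [← h, hMb])]
        simp
      · rw [if_neg hMb, if_neg hMb, if_neg (by simp [← h]; omega)]
    · have hb : pvArgmaxStep (some b, ns) p = (some b, ns) := by
        have h1 : ¬ b < p.2 := by omega
        have h2 : ¬ (p.2 == b) = true := by simp; omega
        simp [pvArgmaxStep, h1, h2]
      have hmax : max b p.2 = b := by omega
      have hM : b ≤ t.foldl (fun a p => max a p.2) b := hle b
      simp only [List.foldl_cons, hb, ih, hmax, List.filter_cons]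
      rw [if_neg (show ¬((fun q => q.2 == t.foldl (fun a p => max a p.2) b) p = true) by simp; omega)]

-- B's one-pass argmax over an index range = A's max?-then-filter over the same range
lemma pvBestAndArgs_eq (f : Int → String) (g : Int → Int) (n : Nat) (hn : 0 < n) :
    pvBestAndArgs ((PySem.List.pyRange 0 (n : Int) 1).map (fun r => (f r, g r))) =
      (PySem.List.max? ((PySem.List.pyRange 0 (n : Int) 1).map g) (fun x => x),
       ((PySem.List.pyRange 0 (n : Int) 1).filter
          (fun r => g r == (PySem.List.max? ((PySem.List.pyRange 0 (n : Int) 1).map g) (fun x => x)).getD 0)).map f) := by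
  have hcons : PySem.List.pyRange 0 (n : Int) 1 = 0 :: PySem.List.pyRange 1 (n : Int) 1 :=
    PySem.List.pyRange_one_cons (by exact_mod_cast hn)
  rw [hcons]
  simp only [List.map_cons, List.filter_cons, pvBestAndArgs, List.foldl_cons]
  have hstep : pvArgmaxStep (none, []) (f 0, g 0) = (some (g 0), [f 0]) := by
    simp [pvArgmaxStep]
  rw [hstep, foldl_pvArgmaxStep, PySem.List.max?_id_cons]
  have hfm : ((PySem.List.pyRange 1 (n : Int) 1).map (fun r => (f r, g r))).foldl (fun a p => max a p.2) (g 0)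
      = ((PySem.List.pyRange 1 (n : Int) 1).map g).foldl max (g 0) := by
    simp [List.foldl_map]
  rw [hfm]
  simp only [Option.getD_some, Prod.mk.injEq, true_and]
  rw [List.filter_map]
  by_cases h0 : g 0 = ((PySem.List.pyRange 1 (n : Int) 1).map g).foldl max (g 0)
  · rw [if_pos h0.symm, if_pos (by rw [← h0]; simp)]
    simp [Function.comp_def]
  · rw [if_neg (fun hh => h0 hh.symm), if_neg (by simp [h0])]
    simp [Function.comp_def]

-- ===== VERDICT (by name: the statement is the Claim_ definition above) =====
theorem explain_cell_spec : Claim_equal_explain_cell := by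
  intro matrix i j rows cols _hdom hpre
  obtain ⟨hi, hj, hrow, hr, hc⟩ := hpre
  have hm : 0 < matrix.length := by
    rcases hi with ⟨h1, h2⟩; omega
  have hrow0 : (PySem.List.pyGetD matrix 0 []) ∈ matrix := by
    have : PySem.Raise.InRange matrix.length (0 : Int) := by
      constructor <;> omega
    exact PySem.List.pyGetD_mem matrix [] this
  have hn2 : 0 < (PySem.List.pyGetD matrix 0 []).length := by
    have := hj _ hrow0
    rcases this with ⟨h1, h2⟩
    omega
  unfold Spec_explain_cell explain_cell explain_cell_alt
  rw [pvBestAndArgs_eq (fun r => PySem.List.pyGetD rows r "")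
        (fun r => (PySem.List.pyGetD (PySem.List.pyGetD matrix r []) j (0, 0)).1) matrix.length hm,
      pvBestAndArgs_eq (fun c => PySem.List.pyGetD cols c "")
        (fun c => (PySem.List.pyGetD (PySem.List.pyGetD matrix i []) c (0, 0)).2) (PySem.List.pyGetD matrix 0 []).length hn2]
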